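-- pv_equiv track=rewrite | github.com/andre12388/01.112 | HNN Project/part2.py | do_simple_sequence_labelling
-- ===== SOURCE A (Python) =====
-- def do_simple_sequence_labelling(emission_parameters: dict,
--                                  x_sequence: list):
--     labelled_sequence = []
--
--     for word in x_sequence:
--         if word not in emission_parameters:
--             word = '#UNK#'
--
--         y2x_dict = emission_parameters[word]
--         argmax_y = max(y2x_dict, key=lambda key: y2x_dict[key])
--         labelled_sequence.append(argmax_y)
--
--     return labelled_sequence
-- ===== SOURCE B (Python) =====
-- def do_simple_sequence_labelling(emission_parameters: dict,
--                                  x_sequence: list):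
--     # Build the full decoding table once (skip tags-less entries), then label by lookup.
--     best = {word: max(tags, key=lambda tag: tags[tag])
--             for word, tags in emission_parameters.items() if tags}
--     return [best[word if word in best else '#UNK#'] for word in x_sequence]
-- ===== Notes on version B (the rewrite author's own statement) =====
-- stated objective: alternative
-- what changed: B replaces A's argmax-while-scanning loop by two passes: it first builds a word->best-tag decoding table from all of emission_parameters (same max key, so tie-breaking matches), then labels x_sequence by pure table lookups with a '#UNK#' fallback; each distinct word's argmax is computed once instead of once per occurrence.
import Mathlib
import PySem

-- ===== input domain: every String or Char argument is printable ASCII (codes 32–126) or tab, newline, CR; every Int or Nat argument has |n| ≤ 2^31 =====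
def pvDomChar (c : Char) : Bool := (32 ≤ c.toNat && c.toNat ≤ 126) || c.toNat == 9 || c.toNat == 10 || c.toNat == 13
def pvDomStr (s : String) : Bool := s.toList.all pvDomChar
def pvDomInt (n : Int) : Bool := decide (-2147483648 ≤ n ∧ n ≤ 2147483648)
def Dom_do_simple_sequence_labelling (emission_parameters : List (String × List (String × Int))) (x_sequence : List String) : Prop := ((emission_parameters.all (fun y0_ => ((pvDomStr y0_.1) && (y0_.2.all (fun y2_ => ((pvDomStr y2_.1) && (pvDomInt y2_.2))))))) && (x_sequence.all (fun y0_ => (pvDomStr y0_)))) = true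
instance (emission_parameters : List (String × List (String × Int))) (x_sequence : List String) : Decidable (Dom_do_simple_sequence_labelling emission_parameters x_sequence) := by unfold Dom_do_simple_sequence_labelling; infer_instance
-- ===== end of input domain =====

-- B builds the whole word→best-tag table in one pass over emission_parameters and then labels
-- x_sequence by lookups (objective: alternative decomposition; same tie-breaking).

-- ===== PORT A =====
-- argmax_y = max(y2x_dict, key=lambda key: y2x_dict[key])  (first maximum in iteration order;
-- identical Python expression in A and B, hence one shared helper; "" is unreachable under Pre_)
def pvArgmaxTag (d : List (String × Int)) : String :=
  (PySem.List.max? (d.map Prod.fst) (fun k => (PySem.Dict.mk d).getD k 0)).getD ""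

def do_simple_sequence_labelling (emission_parameters : List (String × List (String × Int))) (x_sequence : List String) : List String :=
  x_sequence.foldl (fun labelled_sequence word =>
    let word := if ((PySem.Dict.mk emission_parameters).get? word).isSome then word else "#UNK#"
    labelled_sequence ++ [pvArgmaxTag ((PySem.Dict.mk emission_parameters).getD word [])]) []

-- ===== PORT B =====
def do_simple_sequence_labelling_alt (emission_parameters : List (String × List (String × Int))) (x_sequence : List String) : List String :=
  let best := (emission_parameters.filter (fun p => !p.2.isEmpty)).map (fun p => (p.1, pvArgmaxTag p.2))
  x_sequence.map (fun word =>
    (PySem.Dict.mk best).getD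
      (if ((PySem.Dict.mk best).get? word).isSome then word else "#UNK#") "")

-- ===== PRECONDITION & SPEC =====
-- Pre_ is exactly where A returns: for each word the key A looks up (the word itself if present,
-- else '#UNK#') must be present with a NONEMPTY tag dict — otherwise A raises KeyError/ValueError.
def Pre_do_simple_sequence_labelling (emission_parameters : List (String × List (String × Int))) (x_sequence : List String) : Prop :=
  ∀ word ∈ x_sequence,
    (PySem.Dict.mk emission_parameters).getD
      (if ((PySem.Dict.mk emission_parameters).get? word).isSome then word else "#UNK#") [] ≠ []
instance (emission_parameters : List (String × List (String × Int))) (x_sequence : List String) : Decidable (Pre_do_simple_sequence_labelling emission_parameters x_sequence) := by unfold Pre_do_simple_sequence_labelling; infer_instance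

def pvWitness_do_simple_sequence_labelling : (List (String × List (String × Int))) × List String :=
  ([("the", [("DT", 5), ("NN", 2)]), ("#UNK#", [("NN", 1)])], ["the", "cat", "the"])

def Spec_do_simple_sequence_labelling (emission_parameters : List (String × List (String × Int))) (x_sequence : List String) (out : List String) : Prop := out = do_simple_sequence_labelling_alt emission_parameters x_sequence
instance (emission_parameters : List (String × List (String × Int))) (x_sequence : List String) (out : List String) : Decidable (Spec_do_simple_sequence_labelling emission_parameters x_sequence out) := by unfold Spec_do_simple_sequence_labelling; infer_instance

-- ===== CLAIM (what is proved, stated in full; the proofs are below) =====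
def Claim_equal_do_simple_sequence_labelling : Prop := ∀ (emission_parameters : List (String × List (String × Int))) (x_sequence : List String), Dom_do_simple_sequence_labelling emission_parameters x_sequence → Pre_do_simple_sequence_labelling emission_parameters x_sequence → Spec_do_simple_sequence_labelling emission_parameters x_sequence (do_simple_sequence_labelling emission_parameters x_sequence)

-- ===== LEMMAS AND PROOFS =====

-- the table built by B, as a top-level function for the lemmas
def pvBest (ep : List (String × List (String × Int))) : List (String × String) :=
  (ep.filter (fun p => !p.2.isEmpty)).map (fun p => (p.1, pvArgmaxTag p.2))

-- a key whose FIRST binding in ep is a nonempty dict is in the table, bound to its argmax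
lemma pvBest_get?_of_mem (ep : List (String × List (String × Int))) (w : String)
    (d : List (String × Int)) (h : (PySem.Dict.mk ep).get? w = some d) (hne : d ≠ []) :
    (PySem.Dict.mk (pvBest ep)).get? w = some (pvArgmaxTag d) := by
  induction ep with
  | nil => simp [PySem.Dict.get?] at h
  | cons p rest ih =>
    obtain ⟨k0, d0⟩ := p
    rw [PySem.Dict.get?_mk_cons] at h
    by_cases hk : (k0 == w) = true
    · simp [hk] at h
      subst h
      simp [pvBest, hne, PySem.Dict.get?_mk_cons, hk]
    · simp [hk] at h
      have hrec := ih h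
      by_cases he : d0.isEmpty
      · simpa [pvBest, List.filter_cons, he] using hrec
      · simp only [pvBest, List.filter_cons, he] at hrec ⊢
        simpa [PySem.Dict.get?_mk_cons, hk] using hrec

-- a key absent from ep is absent from the table
lemma pvBest_get?_of_not_mem (ep : List (String × List (String × Int))) (w : String)
    (h : (PySem.Dict.mk ep).get? w = none) :
    (PySem.Dict.mk (pvBest ep)).get? w = none := by
  induction ep with
  | nil => simp [pvBest, PySem.Dict.get?]
  | cons p rest ih =>
    obtain ⟨k0, d0⟩ := p
    rw [PySem.Dict.get?_mk_cons] at h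
    by_cases hk : (k0 == w) = true
    · simp [hk] at h
    · simp [hk] at h
      have hrec := ih h
      by_cases he : d0.isEmpty
      · simpa [pvBest, List.filter_cons, he] using hrec
      · simp only [pvBest, List.filter_cons, he] at hrec ⊢
        simpa [PySem.Dict.get?_mk_cons, hk] using hrec

-- per-word agreement under Pre_'s condition for that word
lemma pv_word_eq (ep : List (String × List (String × Int))) (w : String)
    (hw : (PySem.Dict.mk ep).getD
      (if ((PySem.Dict.mk ep).get? w).isSome then w else "#UNK#") [] ≠ []) :
    (let w' := if ((PySem.Dict.mk ep).get? w).isSome then w else "#UNK#"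
     pvArgmaxTag ((PySem.Dict.mk ep).getD w' [])) =
    (PySem.Dict.mk (pvBest ep)).getD
      (if ((PySem.Dict.mk (pvBest ep)).get? w).isSome then w else "#UNK#") "" := by
  by_cases hs : ((PySem.Dict.mk ep).get? w).isSome
  · obtain ⟨d, hd⟩ := Option.isSome_iff_exists.mp hs
    simp only [hs, if_true] at hw ⊢
    rw [PySem.Dict.getD_of_get?_eq_some _ _ hd] at hw ⊢
    have hb := pvBest_get?_of_mem ep w d hd hw
    simp [hb, PySem.Dict.getD_of_get?_eq_some _ _ hb]
  · have hn : (PySem.Dict.mk ep).get? w = none := Option.not_isSome_iff_eq_none.mp hs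
    have hbn := pvBest_get?_of_not_mem ep w hn
    rw [Option.isSome_iff_exists] at hs
    simp only [hn, Option.isSome_none, Bool.false_eq_true, if_false, hbn] at hw ⊢
    obtain ⟨d, hd⟩ : ∃ d, (PySem.Dict.mk ep).get? "#UNK#" = some d := by
      cases h : (PySem.Dict.mk ep).get? "#UNK#" with
      | none => rw [PySem.Dict.getD_of_get?_eq_none _ _ h] at hw; exact absurd rfl hw
      | some d => exact ⟨d, rfl⟩
    rw [PySem.Dict.getD_of_get?_eq_some _ _ hd] at hw ⊢
    have hb := pvBest_get?_of_mem ep "#UNK#" d hd hw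
    simp [PySem.Dict.getD_of_get?_eq_some _ _ hb]

-- ===== VERDICT (by name: the statement is the Claim_ definition above) =====
theorem do_simple_sequence_labelling_spec : Claim_equal_do_simple_sequence_labelling := by
  intro ep xs _ hpre
  unfold Spec_do_simple_sequence_labelling do_simple_sequence_labelling do_simple_sequence_labelling_alt
  rw [PySem.List.foldl_append_singleton_eq_map
        (f := fun word =>
          let word := if ((PySem.Dict.mk ep).get? word).isSome then word else "#UNK#"
          pvArgmaxTag ((PySem.Dict.mk ep).getD word []))]
  simp only [List.nil_append]
  exact List.map_congr_left (fun w hw => pv_word_eq ep w (hpre w hw))
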